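-- pv_equiv track=rewrite | github.com/manKraut/skyscribe-cli | src/skyscribe/agents/features.py | _group_indices_by_date
-- ===== SOURCE A (Python) =====
-- from collections import defaultdict
--
-- def _group_indices_by_date(hours):
--     by_date = defaultdict(list)
--     for i, t in enumerate(hours):
--         date = t.split("T", 1)[0]  # 'YYYY-MM-DD'
--         by_date[date].append(i)
--     # preserve order as first-seen
--     ordered = []
--     seen = set()
--     for t in hours:
--         d = t.split("T", 1)[0]
--         if d not in seen:
--             ordered.append((d, by_date[d]))
--             seen.add(d)
--     return ordered  # [(date, [idx...]), ...]
-- ===== SOURCE B (Python) =====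
-- def _group_indices_by_date(hours):
--     # No dict at all: a date starts a group iff its position is the first
--     # occurrence (dates.index(d) == pos); each group's indices are gathered
--     # by scanning the date list for equal entries.
--     dates = [t.split("T", 1)[0] for t in hours]
--     return [(d, [i for i, x in enumerate(dates) if x == d])
--             for pos, d in enumerate(dates) if dates.index(d) == pos]
-- ===== Notes on version B (the rewrite author's own statement) =====
-- stated objective: alternative
-- what changed: B drops the dict/defaultdict entirely: it keeps a date iff its position is the first occurrence (dates.index(d) == pos) and builds each group's index list by scanning the date list for equal entries, i.e. select-first-occurrences + filter-per-group instead of A's dict accumulation plus seen-set reconciliation pass.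
import Mathlib
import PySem

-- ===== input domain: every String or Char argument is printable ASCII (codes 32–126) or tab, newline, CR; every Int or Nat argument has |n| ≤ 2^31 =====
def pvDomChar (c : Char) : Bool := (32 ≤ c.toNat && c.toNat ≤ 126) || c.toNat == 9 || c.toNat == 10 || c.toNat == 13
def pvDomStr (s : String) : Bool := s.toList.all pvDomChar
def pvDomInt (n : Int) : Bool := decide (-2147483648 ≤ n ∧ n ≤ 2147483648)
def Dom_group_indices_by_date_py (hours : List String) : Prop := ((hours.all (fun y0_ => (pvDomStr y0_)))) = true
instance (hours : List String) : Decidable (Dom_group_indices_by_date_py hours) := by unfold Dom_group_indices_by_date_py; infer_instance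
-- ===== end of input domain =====

-- B is a dict-free alternative of similar cost on this data: it keeps a date iff its
-- position is its first occurrence and gathers each group's indices by scanning for
-- equal dates, instead of A's dict accumulation plus seen-set reconciliation pass.

-- shared helper: t.split("T", 1)[0] (the split of a nonempty separator is never empty, so [0] never raises)
def pvDate (t : String) : String := ((PySem.Str.splitMax? t "T" 1).getD []).headD ""

-- ===== PORT A =====
def group_indices_by_date_py (hours : List String) : List (String × List Int) :=
  -- by_date = defaultdict(list); for i, t in enumerate(hours): by_date[t.split("T",1)[0]].append(i)
  let by_date : PySem.Dict String (List Int) :=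
    (PySem.List.enumerate hours).foldl
      (fun d p => d.modify (pvDate p.2) [] (fun v => v ++ [p.1])) PySem.Dict.empty
  -- ordered = []; seen = set(); for t in hours: d = ...; if d not in seen: ordered.append((d, by_date[d])); seen.add(d)
  (hours.foldl
    (fun (acc : List (String × List Int) × PySem.Set String) t =>
      let d := pvDate t
      if acc.2.contains d then acc
      else (acc.1 ++ [(d, by_date.getD d [])], PySem.Set.add acc.2 d))
    ([], PySem.Set.empty)).1

-- ===== PORT B =====
def group_indices_by_date_py_alt (hours : List String) : List (String × List Int) :=
  -- dates = [t.split("T",1)[0] for t in hours]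
  -- [(d, [i for i, x in enumerate(dates) if x == d]) for pos, d in enumerate(dates) if dates.index(d) == pos]
  -- (dates.index returns a Nat-valued position; enumerate positions start at 0, so
  --  comparing (index? …).map Int.ofNat with the Int position is exact)
  let dates := hours.map pvDate
  ((PySem.List.enumerate dates).filter
      (fun p => (PySem.List.index? dates p.2).map Int.ofNat == some p.1)).map
    (fun p => (p.2, ((PySem.List.enumerate dates).filter (fun q => q.2 == p.2)).map (fun q => q.1)))

-- ===== PRECONDITION & SPEC =====
def Spec_group_indices_by_date_py (hours : List String) (out : List (String × List Int)) : Prop := out = group_indices_by_date_py_alt hours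
instance (hours : List String) (out : List (String × List Int)) : Decidable (Spec_group_indices_by_date_py hours out) := by unfold Spec_group_indices_by_date_py; infer_instance

-- ===== CLAIM (what is proved, stated in full; the proofs are below) =====
def Claim_equal_group_indices_by_date_py : Prop := ∀ (hours : List String), Dom_group_indices_by_date_py hours → Spec_group_indices_by_date_py hours (group_indices_by_date_py hours)

-- ===== LEMMAS AND PROOFS =====

-- the fresh elements of ds relative to seen, in first-seen order
def pvNew (seen : PySem.Set String) : List String → List String
  | [] => []
  | d :: ds => if seen.contains d then pvNew seen ds else d :: pvNew (PySem.Set.add seen d) ds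

theorem pvSeenLoop (key : String → String) (g : String → List Int) (ts : List String)
    (out : List (String × List Int)) (seen : PySem.Set String) :
    ts.foldl
      (fun (acc : List (String × List Int) × PySem.Set String) t =>
        if acc.2.contains (key t) then acc
        else (acc.1 ++ [(key t, g (key t))], PySem.Set.add acc.2 (key t))) (out, seen)
    = (out ++ (pvNew seen (ts.map key)).map (fun d => (d, g d)), PySem.Set.update seen (ts.map key)) := by
  induction ts generalizing out seen with
  | nil => simp [pvNew, PySem.Set.update]
  | cons t ts ih =>
    rw [List.map_cons, PySem.Set.update_cons, List.foldl_cons]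
    by_cases hm : key t ∈ seen
    · have h : seen.contains (key t) = true := (PySem.Set.contains_iff seen (key t)).mpr hm
      rw [if_pos h, ih, PySem.Set.add_of_mem hm]
      simp [pvNew, hm]
    · have h : ¬ seen.contains (key t) = true := fun hc => hm ((PySem.Set.contains_iff seen (key t)).mp hc)
      rw [if_neg h, ih]
      simp [pvNew, hm]

theorem pvEnumMap {α β : Type} (f : α → β) (l : List α) (s : Int) :
    PySem.List.enumerate (l.map f) s = (PySem.List.enumerate l s).map (fun p => (p.1, f p.2)) := by
  induction l generalizing s with
  | nil => simp [PySem.List.enumerate_nil]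
  | cons x xs ih => simp [PySem.List.enumerate_cons, ih]

-- the first-occurrence filter over a suffix, with the whole list as index? reference,
-- yields exactly the fresh dates in first-seen order
theorem pvFirstOcc (suf : List String) (pre : List String) (seen : PySem.Set String)
    (hseen : ∀ x, seen.contains x = true ↔ x ∈ pre) :
    ((PySem.List.enumerate suf (pre.length : Int)).filter
        (fun p => (PySem.List.index? (pre ++ suf) p.2).map Int.ofNat == some p.1)).map (fun p => p.2)
    = pvNew seen suf := by
  induction suf generalizing pre seen with
  | nil => simp [PySem.List.enumerate_nil, pvNew]
  | cons d rest ih =>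
    rw [PySem.List.enumerate_cons, List.filter_cons]
    by_cases hm : d ∈ pre
    · -- d already seen: index? points strictly before pre.length, so the condition fails
      have hidx : PySem.List.index? (pre ++ d :: rest) d = PySem.List.index? pre d :=
        PySem.List.index?_append_of_mem _ hm
      obtain ⟨k, hk⟩ := Option.isSome_iff_exists.mp ((PySem.List.index?_isSome_iff pre d).mpr hm)
      have hklt : k < pre.length := by
        obtain ⟨pre', suf', heq, hlen, _⟩ := (PySem.List.index?_eq_some_iff pre d k).mp hk
        subst heq; subst hlen; simp
      have hcond : ((PySem.List.index? (pre ++ d :: rest) d).map Int.ofNat == some (pre.length : Int)) = false := by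
        rw [hidx, hk]
        simp only [Option.map_some, beq_eq_false_iff_ne, ne_eq, Option.some.injEq,
          Int.ofNat_eq_natCast]
        intro h
        omega
      rw [hcond]
      simp only [Bool.false_eq_true, if_false]
      have := ih (pre ++ [d]) seen (by
        intro x
        rw [hseen x]
        simp only [List.mem_append, List.mem_singleton]
        constructor
        · exact Or.inl
        · rintro (h | rfl)
          · exact h
          · exact hm)
      simp only [List.append_assoc, List.singleton_append, List.length_append,
        List.length_singleton, Nat.cast_add, Nat.cast_one] at this
      rw [this]
      have hc : seen.contains d = true := (hseen d).mpr hm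
      rw [show pvNew seen (d :: rest) = if seen.contains d then pvNew seen rest
        else d :: pvNew (PySem.Set.add seen d) rest from rfl, hc, if_pos rfl]
    · -- d fresh: index? is exactly pre.length, keep it
      have hidx : PySem.List.index? (pre ++ d :: rest) d = some pre.length :=
        (PySem.List.index?_eq_some_iff _ d _).mpr ⟨pre, rest, rfl, rfl, hm⟩
      have hcond : ((PySem.List.index? (pre ++ d :: rest) d).map Int.ofNat == some (pre.length : Int)) = true := by
        rw [hidx]; simp
      rw [hcond, if_pos rfl]
      have hmemseen : ∀ y, y ∈ seen ↔ y ∈ pre := by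
        intro y; rw [← PySem.Set.contains_iff, hseen]
      have := ih (pre ++ [d]) (PySem.Set.add seen d) (by
        intro x
        rw [PySem.Set.contains_iff, PySem.Set.mem_add]
        simp only [List.mem_append, List.mem_singleton, hmemseen x])
      simp only [List.append_assoc, List.singleton_append, List.length_append,
        List.length_singleton, Nat.cast_add, Nat.cast_one] at this
      have hc : seen.contains d = false := by
        rw [Bool.eq_false_iff]
        intro h
        exact hm ((hseen d).mp h)
      simp only [List.map_cons]
      rw [this, show pvNew seen (d :: rest) = if seen.contains d then pvNew seen rest
        else d :: pvNew (PySem.Set.add seen d) rest from rfl, hc]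
      simp

set_option maxHeartbeats 1000000 in
theorem group_indices_by_date_py_spec : Claim_equal_group_indices_by_date_py := by
  intro hours _
  unfold Spec_group_indices_by_date_py
  simp only [group_indices_by_date_py, group_indices_by_date_py_alt]
  set dates := hours.map pvDate with hdates
  set D := (PySem.List.enumerate hours).foldl
      (fun d p => d.modify (pvDate p.2) [] (fun v => v ++ [p.1])) PySem.Dict.empty with hD
  -- A's dict lookup is the per-date index scan
  have hgetD : ∀ c, D.getD c [] =
      ((PySem.List.enumerate hours).filter (fun p => pvDate p.2 == c)).map (fun p => p.1) := by
    intro c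
    have hfold : D = ((PySem.List.enumerate hours).map (fun p => (pvDate p.2, p.1))).foldl
        (fun d p => d.modify p.1 [] (fun v => v ++ [p.2])) PySem.Dict.empty := by
      rw [hD, List.foldl_map]
    rw [hfold, PySem.Dict.getD_foldl_modify_append, PySem.Dict.getD_empty]
    simp [List.filter_map, List.map_map, Function.comp_def]
  -- A's outer loop
  rw [pvSeenLoop pvDate (fun d => D.getD d []) hours [] PySem.Set.empty]
  simp only [List.nil_append]
  -- B's outer comprehension: rewrite as a map over the first-seen dates
  have hfirst := pvFirstOcc dates [] PySem.Set.empty (by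
    intro x; simp [PySem.Set.empty])
  simp only [List.nil_append, List.length_nil, Nat.cast_zero] at hfirst
  have hBmap : ((PySem.List.enumerate dates).filter
        (fun p => (PySem.List.index? dates p.2).map Int.ofNat == some p.1)).map
      (fun p => (p.2, ((PySem.List.enumerate dates).filter (fun q => q.2 == p.2)).map (fun q => q.1)))
      = (pvNew PySem.Set.empty dates).map
      (fun d => (d, ((PySem.List.enumerate dates).filter (fun q => q.2 == d)).map (fun q => q.1))) := by
    rw [← hfirst, List.map_map]
    simp [Function.comp_def]
  rw [hBmap]
  -- the per-date groups agree
  apply List.map_congr_left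
  intro d _
  refine Prod.ext rfl ?_
  rw [hgetD d, hdates, pvEnumMap]
  simp [List.filter_map, List.map_map, Function.comp_def]
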